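-- pv_equiv track=rewrite | github.com/DmitriiBogg/python_homework | assignment1/assignment1.py | titleize
-- ===== SOURCE A (Python) =====
-- def titleize(string):
--     words = string.split()
--     little_words = {"a", "on", "an", "the", "of", "and", "is", "in"}
--     new_string = []
--     for i, word in enumerate(words):
--         if i == 0 or i == len(words) -1:
--             new_string.append(word.capitalize())
--         elif word in little_words:
--             new_string.append(word)
--         else:
--             new_string.append(word.capitalize())
--     return " ".join(new_string) # this one was interesting
-- ===== SOURCE B (Python) =====
-- def titleize(string):
--     words = string.split()
--     little_words = {"a", "on", "an", "the", "of", "and", "is", "in"}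
--     if not words:
--         return ""
--
--     def tail(ws):
--         # ws is the part of the sentence after the first word; its last
--         # element is the sentence's last word and is always capitalized.
--         if len(ws) == 1:
--             return ws[0].capitalize()
--         head = ws[0] if ws[0] in little_words else ws[0].capitalize()
--         return head + " " + tail(ws[1:])
--
--     if len(words) == 1:
--         return words[0].capitalize()
--     return words[0].capitalize() + " " + tail(words[1:])
-- ===== Notes on version B (the rewrite author's own statement) =====
-- stated objective: alternative
-- what changed: Replaces A's single indexed loop (enumerate + position test + list accumulator + join) with direct structural recursion over the word list: the first word is capitalized at the top level and a recursive helper processes the remaining words, capitalizing its final element and building the result string directly with explicit separators, without indices, an output list, or a join.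
import Mathlib
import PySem

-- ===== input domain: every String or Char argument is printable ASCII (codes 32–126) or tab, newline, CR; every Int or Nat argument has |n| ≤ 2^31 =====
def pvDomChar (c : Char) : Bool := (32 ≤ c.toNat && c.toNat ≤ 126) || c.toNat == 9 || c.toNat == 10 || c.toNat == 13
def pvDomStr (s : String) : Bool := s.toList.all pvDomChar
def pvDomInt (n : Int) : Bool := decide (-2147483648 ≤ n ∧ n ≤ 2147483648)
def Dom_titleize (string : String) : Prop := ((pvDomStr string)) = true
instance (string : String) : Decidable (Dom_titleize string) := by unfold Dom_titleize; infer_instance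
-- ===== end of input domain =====

-- B replaces A's indexed loop + list + join by direct structural recursion over the word list,
-- building the result string with explicit separators; same value, different decomposition.

-- str.capitalize() : first char uppercased, rest lowered (exact on ASCII)
def pyCapitalize (s : String) : String :=
  match s.toList with
  | [] => ""
  | c :: rest => String.ofList (PySem.Chars.upperChar c :: PySem.Chars.lower rest)

def littleWords : PySem.Set String :=
  PySem.Set.ofList ["a", "on", "an", "the", "of", "and", "is", "in"]

-- ===== PORT A =====
def titleize (string : String) : String :=
  let words := PySem.Str.split₀ string
  let new_string := (PySem.List.enumerate words).foldl (fun acc iw =>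
    if iw.1 == 0 || iw.1 == (words.length : Int) - 1 then acc ++ [pyCapitalize iw.2]
    else if PySem.Set.contains littleWords iw.2 then acc ++ [iw.2]
    else acc ++ [pyCapitalize iw.2]) []
  PySem.Str.join " " new_string

-- ===== PORT B =====
-- 'tail' of Source B: the words after the first one; the [] case is unreachable in B
def titleizeTail (ws : List String) : String :=
  match ws with
  | [] => ""
  | [w] => pyCapitalize w
  | w :: rest =>
    (if PySem.Set.contains littleWords w then w else pyCapitalize w) ++ " " ++ titleizeTail rest

def titleize_alt (string : String) : String :=
  match PySem.Str.split₀ string with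
  | [] => ""
  | [w] => pyCapitalize w
  | w :: rest => pyCapitalize w ++ " " ++ titleizeTail rest

-- ===== PRECONDITION & SPEC =====
def Spec_titleize (string : String) (out : String) : Prop := out = titleize_alt string
instance (string : String) (out : String) : Decidable (Spec_titleize string out) := by unfold Spec_titleize; infer_instance

-- ===== CLAIM (what is proved, stated in full; the proofs are below) =====
def Claim_equal_titleize : Prop := ∀ (string : String), Dom_titleize string → Spec_titleize string (titleize string)

-- ===== LEMMAS AND PROOFS =====

-- the per-word value A computes (proof-only helper)
def branchA (n : Int) (iw : Int × String) : String :=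
  if iw.1 == 0 || iw.1 == n - 1 then pyCapitalize iw.2
  else if PySem.Set.contains littleWords iw.2 then iw.2
  else pyCapitalize iw.2

-- the per-word value B's tail computes on a non-last word (proof-only helper)
def hB (w : String) : String :=
  if PySem.Set.contains littleWords w then w else pyCapitalize w

-- the list of tokens B's tail joins (proof-only helper)
def mapB : List String → List String
  | [] => []
  | [w] => [pyCapitalize w]
  | w :: rest => hB w :: mapB rest

theorem A_fold_eq_map (words : List String) (acc : List String) :
    (PySem.List.enumerate words).foldl (fun acc iw =>
      if iw.1 == 0 || iw.1 == (words.length : Int) - 1 then acc ++ [pyCapitalize iw.2]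
      else if PySem.Set.contains littleWords iw.2 then acc ++ [iw.2]
      else acc ++ [pyCapitalize iw.2]) acc
    = acc ++ (PySem.List.enumerate words).map (branchA (words.length : Int)) := by
  have hstep : (fun (acc : List String) (iw : Int × String) =>
      if iw.1 == 0 || iw.1 == (words.length : Int) - 1 then acc ++ [pyCapitalize iw.2]
      else if PySem.Set.contains littleWords iw.2 then acc ++ [iw.2]
      else acc ++ [pyCapitalize iw.2])
      = (fun acc iw => acc ++ [branchA (words.length : Int) iw]) := by
    funext a iw
    unfold branchA
    split
    · rfl
    · split <;> rfl
  rw [hstep, PySem.List.foldl_append_singleton_eq_map]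

theorem strJoin_singleton (sep p : String) : PySem.Str.join sep [p] = p := by
  simp [PySem.Str.join, PySem.Chars.join_singleton]

theorem strJoin_cons_cons (sep p q : String) (rest : List String) :
    PySem.Str.join sep (p :: q :: rest) = p ++ sep ++ PySem.Str.join sep (q :: rest) := by
  simp [PySem.Str.join, PySem.Chars.join_cons_cons, String.ofList_append, String.append_assoc]

theorem mapB_ne_nil (ws : List String) (h : ws ≠ []) : mapB ws ≠ [] := by
  match ws with
  | [] => exact absurd rfl h
  | [w] => simp [mapB]
  | w :: x :: r => simp [mapB]

theorem tail_eq_join (ws : List String) (h : ws ≠ []) :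
    titleizeTail ws = PySem.Str.join " " (mapB ws) := by
  match ws with
  | [] => exact absurd rfl h
  | [w] => rw [show mapB [w] = [pyCapitalize w] from rfl, strJoin_singleton]; rfl
  | w :: x :: r =>
    have ih := tail_eq_join (x :: r) (by simp)
    obtain ⟨q, rest', hq⟩ := List.exists_cons_of_ne_nil (mapB_ne_nil (x :: r) (by simp))
    show hB w ++ " " ++ titleizeTail (x :: r) = PySem.Str.join " " (hB w :: mapB (x :: r))
    rw [ih, hq, strJoin_cons_cons]

theorem mapB_getElem? (ws : List String) (j : Nat) :
    (mapB ws)[j]? = ws[j]?.map (fun w => if j + 1 = ws.length then pyCapitalize w else hB w) := by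
  match ws with
  | [] => simp [mapB]
  | [w] =>
    match j with
    | 0 => simp [mapB]
    | j + 1 => simp [mapB]
  | w :: x :: r =>
    match j with
    | 0 =>
      simp [mapB]
    | k + 1 =>
      have ih := mapB_getElem? (x :: r) k
      show (mapB (x :: r))[k]? = _
      rw [ih]
      simp only [List.getElem?_cons_succ]
      by_cases hc : k + 1 = (x :: r).length
      · simp [hc]
      · simp [hc]

theorem lists_eq (w : String) (rest : List String) :
    (PySem.List.enumerate (w :: rest)).map (branchA ((w :: rest).length : Int)) =
      pyCapitalize w :: mapB rest := by
  apply List.ext_getElem?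
  intro j
  rw [List.getElem?_map, PySem.List.getElem?_enumerate]
  match j with
  | 0 =>
    simp [branchA]
  | k + 1 =>
    simp only [List.getElem?_cons_succ, mapB_getElem?]
    by_cases hk : k < rest.length
    · have h1 : rest[k]? = some rest[k] := List.getElem?_eq_getElem hk
      rw [h1]
      simp only [Option.map_some, Option.some.injEq, zero_add]
      unfold branchA hB
      by_cases hlast : k + 1 = rest.length
      · split_ifs with hc1 hc2 hc3 <;>
          simp only [Bool.or_eq_true, beq_iff_eq] at hc1 <;>
          first | rfl | (exfalso; omega) | (exfalso; rcases hc1 with h | h <;> simp at h <;> omega) | (exfalso; exact hc1 (Or.inr (by simp only [List.length_cons]; push_cast; omega)))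
      · split_ifs with hc1 hc2 hc3 <;>
          simp only [Bool.or_eq_true, beq_iff_eq] at hc1 <;>
          first | rfl | (exfalso; omega) | (exfalso; rcases hc1 with h | h <;> simp at h <;> omega)
    · have h1 : rest[k]? = none := List.getElem?_eq_none (by omega)
      rw [h1]
      rfl

-- ===== VERDICT (by name: the statement is the Claim_ definition above) =====
theorem titleize_spec : Claim_equal_titleize := by
  intro s _
  unfold Spec_titleize titleize titleize_alt
  match hw : PySem.Str.split₀ s with
  | [] =>
    show PySem.Str.join " " _ = ""
    simp [PySem.List.enumerate, PySem.Str.join, PySem.Chars.join, List.intercalate]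
  | [w] =>
    show PySem.Str.join " " ((PySem.List.enumerate [w]).foldl _ []) = pyCapitalize w
    rw [A_fold_eq_map, List.nil_append]
    have : (PySem.List.enumerate [w]).map (branchA (([w] : List String).length : Int))
        = [pyCapitalize w] := by
      simp [PySem.List.enumerate_cons, PySem.List.enumerate_nil, branchA]
    rw [this, strJoin_singleton]
  | w :: x :: r =>
    show PySem.Str.join " " ((PySem.List.enumerate (w :: x :: r)).foldl _ [])
        = pyCapitalize w ++ " " ++ titleizeTail (x :: r)
    rw [A_fold_eq_map, List.nil_append, lists_eq w (x :: r)]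
    obtain ⟨q, rest', hq⟩ := List.exists_cons_of_ne_nil (mapB_ne_nil (x :: r) (by simp))
    rw [tail_eq_join (x :: r) (by simp), hq, strJoin_cons_cons]
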